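-- pv_equiv track=rewrite | github.com/fakejutsu/cv-diploma | src/diploma_sar_detection/custom_models/original_wavevit_backbone.py | _remap_official_key
-- ===== SOURCE A (Python) =====
-- def _remap_official_key(key: str) -> str | None:
--     normalized = key
--     for prefix in ("module.", "model."):
--         if normalized.startswith(prefix):
--             normalized = normalized[len(prefix) :]
--
--     ignored_prefixes = ("head.", "aux_head.", "post_network.")
--     if normalized.startswith(ignored_prefixes):
--         return None
--
--     for stage_index in range(4):
--         official_stage = stage_index + 1
--         patch_prefix = f"patch_embed{official_stage}."
--         if normalized.startswith(patch_prefix):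
--             return f"stages.{stage_index}.patch_embed.{normalized[len(patch_prefix):]}"
--
--         block_prefix = f"block{official_stage}."
--         if normalized.startswith(block_prefix):
--             tail = normalized[len(block_prefix) :]
--             tail = tail.replace(".attn.kv.0.", ".attn.kv_norm.")
--             tail = tail.replace(".attn.kv.1.", ".attn.kv.")
--             return f"stages.{stage_index}.blocks.{tail}"
--
--         norm_prefix = f"norm{official_stage}."
--         if normalized.startswith(norm_prefix):
--             return f"stages.{stage_index}.norm.{normalized[len(norm_prefix):]}"
--
--     return normalized
-- ===== SOURCE B (Python) =====
-- def _remap_official_key(key: str) -> str | None: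
--     normalized = key.removeprefix("module.").removeprefix("model.")
--     if normalized.startswith(("head.", "aux_head.", "post_network.")):
--         return None
--     head, sep, tail = normalized.partition(".")
--     if sep and head[-1:] in ("1", "2", "3", "4"):
--         stage = int(head[-1]) - 1
--         kind = head[:-1]
--         if kind == "patch_embed":
--             return f"stages.{stage}.patch_embed.{tail}"
--         if kind == "block":
--             tail = tail.replace(".attn.kv.0.", ".attn.kv_norm.")
--             tail = tail.replace(".attn.kv.1.", ".attn.kv.")
--             return f"stages.{stage}.blocks.{tail}"
--         if kind == "norm":
--             return f"stages.{stage}.norm.{tail}"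
--     return normalized
-- ===== Notes on version B (the rewrite author's own statement) =====
-- stated objective: idiomatic
-- what changed: Instead of looping over range(4) and testing 12 generated candidate prefixes, B strips the wrappers with removeprefix, partitions the key at the first dot once, and dispatches on the parsed (kind, stage digit) pair.
import Mathlib
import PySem

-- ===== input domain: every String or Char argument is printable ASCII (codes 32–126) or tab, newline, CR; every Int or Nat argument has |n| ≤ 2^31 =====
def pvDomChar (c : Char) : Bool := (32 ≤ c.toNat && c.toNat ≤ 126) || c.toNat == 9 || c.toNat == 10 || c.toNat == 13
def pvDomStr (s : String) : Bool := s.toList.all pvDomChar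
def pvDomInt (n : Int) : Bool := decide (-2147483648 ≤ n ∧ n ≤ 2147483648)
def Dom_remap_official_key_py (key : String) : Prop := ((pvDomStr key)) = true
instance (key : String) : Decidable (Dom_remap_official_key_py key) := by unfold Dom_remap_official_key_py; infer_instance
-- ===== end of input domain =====

-- B replaces A's range(4) loop over 12 generated candidate prefixes by one partition of the
-- key at its first dot and a dispatch on the parsed (kind, stage-digit) pair; same values everywhere.

-- ===== PORT A =====
-- the for-loop over range(4) with its early returns, on the key's character list
def pvStageLoopA (n : List Char) : List Int → Option (List Char)
  | [] => some n
  | i :: rest =>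
    let official : Int := i + 1
    let patch_prefix := "patch_embed".toList ++ (PySem.Int.toStr official).toList ++ ['.']
    if PySem.Chars.startswith n patch_prefix then
      some ("stages.".toList ++ (PySem.Int.toStr i).toList ++ ".patch_embed.".toList ++
            PySem.Chars.slice n (some (patch_prefix.length : Int)) none)
    else
      let block_prefix := "block".toList ++ (PySem.Int.toStr official).toList ++ ['.']
      if PySem.Chars.startswith n block_prefix then
        let tail := PySem.Chars.slice n (some (block_prefix.length : Int)) none
        let tail := PySem.Chars.replace tail ".attn.kv.0.".toList ".attn.kv_norm.".toList
        let tail := PySem.Chars.replace tail ".attn.kv.1.".toList ".attn.kv.".toList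
        some ("stages.".toList ++ (PySem.Int.toStr i).toList ++ ".blocks.".toList ++ tail)
      else
        let norm_prefix := "norm".toList ++ (PySem.Int.toStr official).toList ++ ['.']
        if PySem.Chars.startswith n norm_prefix then
          some ("stages.".toList ++ (PySem.Int.toStr i).toList ++ ".norm.".toList ++
                PySem.Chars.slice n (some (norm_prefix.length : Int)) none)
        else pvStageLoopA n rest

def remap_official_key_py (key : String) : Option String :=
  -- for prefix in ("module.", "model."): strip it if present
  let normalized := ["module.".toList, "model.".toList].foldl
    (fun n p => if PySem.Chars.startswith n p then PySem.Chars.slice n (some (p.length : Int)) none else n)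
    key.toList
  -- startswith with a tuple = any of the three
  if PySem.Chars.startswith normalized "head.".toList ||
     PySem.Chars.startswith normalized "aux_head.".toList ||
     PySem.Chars.startswith normalized "post_network.".toList then none
  else (pvStageLoopA normalized (PySem.List.pyRange 0 4 1)).map String.ofList

-- ===== PORT B =====
-- head, sep, tail = normalized.partition(".") followed by the dispatch on (kind, digit);
-- 'sep' is nonempty iff the takeWhile head is shorter than the string;
-- head[-1:] in ("1","2","3","4") is transcribed as a match on the last character;
-- int(head[-1]) - 1 via PySem.Int.ofStr? (the digit guard guarantees the some case)
def pvParseB (n : List Char) : List Char :=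
  let head := n.takeWhile (· ≠ '.')
  if head.length = n.length then n  -- no separator: partition returned sep = ""
  else
    let tail := n.drop (head.length + 1)
    match head.getLast? with
    | some d =>
      if d = '1' ∨ d = '2' ∨ d = '3' ∨ d = '4' then
        let stage : Int := (PySem.Int.ofStr? (String.ofList [d])).getD 0 - 1
        let kind := head.dropLast
        if kind = "patch_embed".toList then
          "stages.".toList ++ (PySem.Int.toStr stage).toList ++ ".patch_embed.".toList ++ tail
        else if kind = "block".toList then
          let t1 := PySem.Chars.replace tail ".attn.kv.0.".toList ".attn.kv_norm.".toList
          let t2 := PySem.Chars.replace t1 ".attn.kv.1.".toList ".attn.kv.".toList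
          "stages.".toList ++ (PySem.Int.toStr stage).toList ++ ".blocks.".toList ++ t2
        else if kind = "norm".toList then
          "stages.".toList ++ (PySem.Int.toStr stage).toList ++ ".norm.".toList ++ tail
        else n
      else n
    | none => n

def remap_official_key_py_alt (key : String) : Option String :=
  -- key.removeprefix("module.").removeprefix("model.")
  let n1 := if PySem.Chars.startswith key.toList "module.".toList then key.toList.drop 7 else key.toList
  let n2 := if PySem.Chars.startswith n1 "model.".toList then n1.drop 6 else n1
  if PySem.Chars.startswith n2 "head.".toList ||
     PySem.Chars.startswith n2 "aux_head.".toList ||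
     PySem.Chars.startswith n2 "post_network.".toList then none
  else some (String.ofList (pvParseB n2))

-- ===== PRECONDITION & SPEC =====
def Spec_remap_official_key_py (key : String) (out : Option String) : Prop := out = remap_official_key_py_alt key
instance (key : String) (out : Option String) : Decidable (Spec_remap_official_key_py key out) := by unfold Spec_remap_official_key_py; infer_instance

-- ===== CLAIM (what is proved, stated in full; the proofs are below) =====
def Claim_equal_remap_official_key_py : Prop := ∀ (key : String), Dom_remap_official_key_py key → Spec_remap_official_key_py key (remap_official_key_py key)

-- ===== LEMMAS AND PROOFS =====

-- the head of a key whose stage prefix has been split off: takeWhile stops at the first dot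
theorem pv_tw (h t : List Char) (hh : '.' ∉ h) : (h ++ '.'::t).takeWhile (· ≠ '.') = h := by
  have hself : h.takeWhile (· ≠ '.') = h := by
    rw [List.takeWhile_eq_self_iff]
    intro x hx
    simp only [decide_eq_true_eq]
    exact fun e => hh (e ▸ hx)
  rw [List.takeWhile_append, hself]
  simp

-- a dotted prefix cannot match a key without a dot
theorem pv_sw_nodot (n q : List Char) (hd : '.' ∉ n) (hq : '.' ∈ q) :
    PySem.Chars.startswith n q = false := by
  rw [← Bool.not_eq_true, PySem.Chars.startswith_iff]
  exact fun hpre => hd (hpre.sublist.subset hq)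

-- a candidate 'kind+digit.' prefix matches exactly when it equals the part before the first dot
theorem pv_sw_ne (h t q : List Char) (hh : '.' ∉ h) (hq : '.' ∉ q) (hne : q ≠ h) :
    PySem.Chars.startswith (h ++ '.'::t) (q ++ ['.']) = false := by
  rw [← Bool.not_eq_true, PySem.Chars.startswith_iff]
  rintro ⟨s, hs⟩
  rw [List.append_assoc, List.singleton_append] at hs
  have := congrArg (List.takeWhile (· ≠ '.')) hs
  rw [pv_tw q s hq, pv_tw h t hh] at this
  exact hne this

-- a key containing a dot splits as head ++ '.' ++ rest
theorem pv_split (n : List Char) (hdot : '.' ∈ n) :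
    n = n.takeWhile (· ≠ '.') ++ '.' :: (n.dropWhile (· ≠ '.')).tail := by
  have hne : n.dropWhile (· ≠ '.') ≠ [] := by
    intro he
    have h2 := List.takeWhile_append_dropWhile (p := fun x : Char => decide (x ≠ '.')) (l := n)
    rw [he, List.append_nil] at h2
    rw [← h2] at hdot
    have := List.mem_takeWhile_imp hdot
    simp at this
  have hhead : (n.dropWhile (· ≠ '.')).head hne = '.' := by
    have := List.head_dropWhile_not (fun x : Char => decide (x ≠ '.')) hne
    simpa using this
  have hdw : n.dropWhile (· ≠ '.') = '.' :: (n.dropWhile (· ≠ '.')).tail := by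
    nth_rewrite 1 [← List.cons_head_tail hne]
    rw [hhead]
  conv_lhs => rw [← List.takeWhile_append_dropWhile (p := fun x : Char => decide (x ≠ '.')) (l := n)]
  exact congrArg (_ ++ ·) hdw

-- B leaves a key alone when its head is none of the twelve stage prefixes
theorem parseB_id (h t : List Char) (hh : '.' ∉ h)
    (hnot : h ∉ ["patch_embed1".toList, "block1".toList, "norm1".toList,
                 "patch_embed2".toList, "block2".toList, "norm2".toList,
                 "patch_embed3".toList, "block3".toList, "norm3".toList,
                 "patch_embed4".toList, "block4".toList, "norm4".toList]) :
    pvParseB (h ++ '.'::t) = h ++ '.'::t := by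
  simp only [pvParseB, pv_tw h t hh]
  rw [if_neg (by simp)]
  cases hg : h.getLast? with
  | none => rfl
  | some d =>
    dsimp only
    have hcomb : h = h.dropLast ++ [d] := (List.dropLast_append_getLast? d hg).symm
    by_cases hd : d = '1' ∨ d = '2' ∨ d = '3' ∨ d = '4'
    · rw [if_pos hd]
      by_cases kp : h.dropLast = "patch_embed".toList
      · exfalso
        rw [kp] at hcomb
        rcases hd with e|e|e|e <;> subst e <;> exact hnot (by rw [hcomb]; decide)
      · rw [if_neg kp]
        by_cases kb : h.dropLast = "block".toList
        · exfalso
          rw [kb] at hcomb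
          rcases hd with e|e|e|e <;> subst e <;> exact hnot (by rw [hcomb]; decide)
        · rw [if_neg kb]
          by_cases kn : h.dropLast = "norm".toList
          · exfalso
            rw [kn] at hcomb
            rcases hd with e|e|e|e <;> subst e <;> exact hnot (by rw [hcomb]; decide)
          · rw [if_neg kn]
    · rw [if_neg hd]

theorem core_eq (n : List Char) : pvStageLoopA n [0, 1, 2, 3] = some (pvParseB n) := by
  by_cases hdot : '.' ∈ n
  · have hh0 : '.' ∉ n.takeWhile (· ≠ '.') := fun hx => by simpa using List.mem_takeWhile_imp hx
    obtain ⟨h, t, hh, rfl⟩ : ∃ h t, '.' ∉ h ∧ n = h ++ '.'::t := ⟨_, _, hh0, pv_split n hdot⟩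
    by_cases e1 : h = "patch_embed1".toList
    · subst e1
      simp [pvStageLoopA, pvParseB, PySem.Chars.startswith, List.isPrefixOf,
          PySem.Chars.slice_eq_listSlice, PySem.List.slice_some_none,
          show PySem.Int.toChars 0 = ['0'] from by decide,
          show PySem.Int.toChars 1 = ['1'] from by decide,
          show PySem.Int.ofStr? (String.ofList ['1']) = some 1 from by decide]
    by_cases e2 : h = "block1".toList
    · subst e2
      simp [pvStageLoopA, pvParseB, PySem.Chars.startswith, List.isPrefixOf,
          PySem.Chars.slice_eq_listSlice, PySem.List.slice_some_none,
          show PySem.Int.toChars 0 = ['0'] from by decide,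
          show PySem.Int.toChars 1 = ['1'] from by decide,
          show PySem.Int.ofStr? (String.ofList ['1']) = some 1 from by decide]
    by_cases e3 : h = "norm1".toList
    · subst e3
      simp [pvStageLoopA, pvParseB, PySem.Chars.startswith, List.isPrefixOf,
          PySem.Chars.slice_eq_listSlice, PySem.List.slice_some_none,
          show PySem.Int.toChars 0 = ['0'] from by decide,
          show PySem.Int.toChars 1 = ['1'] from by decide,
          show PySem.Int.ofStr? (String.ofList ['1']) = some 1 from by decide]
    by_cases e4 : h = "patch_embed2".toList
    · subst e4
      simp [pvStageLoopA, pvParseB, PySem.Chars.startswith, List.isPrefixOf,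
          PySem.Chars.slice_eq_listSlice, PySem.List.slice_some_none,
          show PySem.Int.toChars 1 = ['1'] from by decide,
          show PySem.Int.toChars 2 = ['2'] from by decide,
          show PySem.Int.ofStr? (String.ofList ['2']) = some 2 from by decide]
    by_cases e5 : h = "block2".toList
    · subst e5
      simp [pvStageLoopA, pvParseB, PySem.Chars.startswith, List.isPrefixOf,
          PySem.Chars.slice_eq_listSlice, PySem.List.slice_some_none,
          show PySem.Int.toChars 1 = ['1'] from by decide,
          show PySem.Int.toChars 2 = ['2'] from by decide,
          show PySem.Int.ofStr? (String.ofList ['2']) = some 2 from by decide]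
    by_cases e6 : h = "norm2".toList
    · subst e6
      simp [pvStageLoopA, pvParseB, PySem.Chars.startswith, List.isPrefixOf,
          PySem.Chars.slice_eq_listSlice, PySem.List.slice_some_none,
          show PySem.Int.toChars 1 = ['1'] from by decide,
          show PySem.Int.toChars 2 = ['2'] from by decide,
          show PySem.Int.ofStr? (String.ofList ['2']) = some 2 from by decide]
    by_cases e7 : h = "patch_embed3".toList
    · subst e7
      simp [pvStageLoopA, pvParseB, PySem.Chars.startswith, List.isPrefixOf,
          PySem.Chars.slice_eq_listSlice, PySem.List.slice_some_none,
          show PySem.Int.toChars 1 = ['1'] from by decide,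
          show PySem.Int.toChars 2 = ['2'] from by decide,
          show PySem.Int.toChars 3 = ['3'] from by decide,
          show PySem.Int.ofStr? (String.ofList ['3']) = some 3 from by decide]
    by_cases e8 : h = "block3".toList
    · subst e8
      simp [pvStageLoopA, pvParseB, PySem.Chars.startswith, List.isPrefixOf,
          PySem.Chars.slice_eq_listSlice, PySem.List.slice_some_none,
          show PySem.Int.toChars 1 = ['1'] from by decide,
          show PySem.Int.toChars 2 = ['2'] from by decide,
          show PySem.Int.toChars 3 = ['3'] from by decide,
          show PySem.Int.ofStr? (String.ofList ['3']) = some 3 from by decide]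
    by_cases e9 : h = "norm3".toList
    · subst e9
      simp [pvStageLoopA, pvParseB, PySem.Chars.startswith, List.isPrefixOf,
          PySem.Chars.slice_eq_listSlice, PySem.List.slice_some_none,
          show PySem.Int.toChars 1 = ['1'] from by decide,
          show PySem.Int.toChars 2 = ['2'] from by decide,
          show PySem.Int.toChars 3 = ['3'] from by decide,
          show PySem.Int.ofStr? (String.ofList ['3']) = some 3 from by decide]
    by_cases e10 : h = "patch_embed4".toList
    · subst e10
      simp [pvStageLoopA, pvParseB, PySem.Chars.startswith, List.isPrefixOf,
          PySem.Chars.slice_eq_listSlice, PySem.List.slice_some_none,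
          show PySem.Int.toChars 1 = ['1'] from by decide,
          show PySem.Int.toChars 2 = ['2'] from by decide,
          show PySem.Int.toChars 3 = ['3'] from by decide,
          show PySem.Int.toChars 4 = ['4'] from by decide,
          show PySem.Int.ofStr? (String.ofList ['4']) = some 4 from by decide]
    by_cases e11 : h = "block4".toList
    · subst e11
      simp [pvStageLoopA, pvParseB, PySem.Chars.startswith, List.isPrefixOf,
          PySem.Chars.slice_eq_listSlice, PySem.List.slice_some_none,
          show PySem.Int.toChars 1 = ['1'] from by decide,
          show PySem.Int.toChars 2 = ['2'] from by decide,
          show PySem.Int.toChars 3 = ['3'] from by decide,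
          show PySem.Int.toChars 4 = ['4'] from by decide,
          show PySem.Int.ofStr? (String.ofList ['4']) = some 4 from by decide]
    by_cases e12 : h = "norm4".toList
    · subst e12
      simp [pvStageLoopA, pvParseB, PySem.Chars.startswith, List.isPrefixOf,
          PySem.Chars.slice_eq_listSlice, PySem.List.slice_some_none,
          show PySem.Int.toChars 1 = ['1'] from by decide,
          show PySem.Int.toChars 2 = ['2'] from by decide,
          show PySem.Int.toChars 3 = ['3'] from by decide,
          show PySem.Int.toChars 4 = ['4'] from by decide,
          show PySem.Int.ofStr? (String.ofList ['4']) = some 4 from by decide]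
    -- fall-through: h is none of the 12 stage prefixes
    have hnot : h ∉ ["patch_embed1".toList, "block1".toList, "norm1".toList, "patch_embed2".toList, "block2".toList, "norm2".toList, "patch_embed3".toList, "block3".toList, "norm3".toList, "patch_embed4".toList, "block4".toList, "norm4".toList] := by
      intro hm
      rcases (by simpa using hm : h = "patch_embed1".toList ∨ h = "block1".toList ∨ h = "norm1".toList ∨ h = "patch_embed2".toList ∨ h = "block2".toList ∨ h = "norm2".toList ∨ h = "patch_embed3".toList ∨ h = "block3".toList ∨ h = "norm3".toList ∨ h = "patch_embed4".toList ∨ h = "block4".toList ∨ h = "norm4".toList) with e|e|e|e|e|e|e|e|e|e|e|e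
      exacts [e1 e, e2 e, e3 e, e4 e, e5 e, e6 e, e7 e, e8 e, e9 e, e10 e, e11 e, e12 e]
    rw [parseB_id h t hh hnot]
    have c : ∀ q, '.' ∉ q → q ≠ h → PySem.Chars.startswith (h ++ '.'::t) (q ++ ['.']) = false :=
      fun q hq hne => pv_sw_ne h t q hh hq hne
    have c1 : PySem.Chars.startswith (h ++ '.'::t) ['p', 'a', 't', 'c', 'h', '_', 'e', 'm', 'b', 'e', 'd', '1', '.'] = false := by
      simpa using c "patch_embed1".toList (by decide) (fun e => e1 e.symm)
    have c2 : PySem.Chars.startswith (h ++ '.'::t) ['b', 'l', 'o', 'c', 'k', '1', '.'] = false := by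
      simpa using c "block1".toList (by decide) (fun e => e2 e.symm)
    have c3 : PySem.Chars.startswith (h ++ '.'::t) ['n', 'o', 'r', 'm', '1', '.'] = false := by
      simpa using c "norm1".toList (by decide) (fun e => e3 e.symm)
    have c4 : PySem.Chars.startswith (h ++ '.'::t) ['p', 'a', 't', 'c', 'h', '_', 'e', 'm', 'b', 'e', 'd', '2', '.'] = false := by
      simpa using c "patch_embed2".toList (by decide) (fun e => e4 e.symm)
    have c5 : PySem.Chars.startswith (h ++ '.'::t) ['b', 'l', 'o', 'c', 'k', '2', '.'] = false := by
      simpa using c "block2".toList (by decide) (fun e => e5 e.symm)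
    have c6 : PySem.Chars.startswith (h ++ '.'::t) ['n', 'o', 'r', 'm', '2', '.'] = false := by
      simpa using c "norm2".toList (by decide) (fun e => e6 e.symm)
    have c7 : PySem.Chars.startswith (h ++ '.'::t) ['p', 'a', 't', 'c', 'h', '_', 'e', 'm', 'b', 'e', 'd', '3', '.'] = false := by
      simpa using c "patch_embed3".toList (by decide) (fun e => e7 e.symm)
    have c8 : PySem.Chars.startswith (h ++ '.'::t) ['b', 'l', 'o', 'c', 'k', '3', '.'] = false := by
      simpa using c "block3".toList (by decide) (fun e => e8 e.symm)
    have c9 : PySem.Chars.startswith (h ++ '.'::t) ['n', 'o', 'r', 'm', '3', '.'] = false := by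
      simpa using c "norm3".toList (by decide) (fun e => e9 e.symm)
    have c10 : PySem.Chars.startswith (h ++ '.'::t) ['p', 'a', 't', 'c', 'h', '_', 'e', 'm', 'b', 'e', 'd', '4', '.'] = false := by
      simpa using c "patch_embed4".toList (by decide) (fun e => e10 e.symm)
    have c11 : PySem.Chars.startswith (h ++ '.'::t) ['b', 'l', 'o', 'c', 'k', '4', '.'] = false := by
      simpa using c "block4".toList (by decide) (fun e => e11 e.symm)
    have c12 : PySem.Chars.startswith (h ++ '.'::t) ['n', 'o', 'r', 'm', '4', '.'] = false := by
      simpa using c "norm4".toList (by decide) (fun e => e12 e.symm)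
    simp only [pvStageLoopA]
    simp [c1, c2, c3, c4, c5, c6, c7, c8, c9, c10, c11, c12,
          show PySem.Int.toChars 1 = ['1'] from by decide,
          show PySem.Int.toChars 2 = ['2'] from by decide,
          show PySem.Int.toChars 3 = ['3'] from by decide,
          show PySem.Int.toChars 4 = ['4'] from by decide]
  · have hnd : ∀ q, '.' ∈ q → PySem.Chars.startswith n q = false := fun q hq => pv_sw_nodot n q hdot hq
    have htw : n.takeWhile (· ≠ '.') = n := by
      rw [List.takeWhile_eq_self_iff]
      intro x hx
      simp only [decide_eq_true_eq]
      exact fun e => hdot (e ▸ hx)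
    have htw2 : List.takeWhile (fun x => !decide (x = '.')) n = n := by simpa using htw
    have c1 : PySem.Chars.startswith n ['p', 'a', 't', 'c', 'h', '_', 'e', 'm', 'b', 'e', 'd', '1', '.'] = false := by
      simpa using hnd "patch_embed1.".toList (by decide)
    have c2 : PySem.Chars.startswith n ['b', 'l', 'o', 'c', 'k', '1', '.'] = false := by
      simpa using hnd "block1.".toList (by decide)
    have c3 : PySem.Chars.startswith n ['n', 'o', 'r', 'm', '1', '.'] = false := by
      simpa using hnd "norm1.".toList (by decide)
    have c4 : PySem.Chars.startswith n ['p', 'a', 't', 'c', 'h', '_', 'e', 'm', 'b', 'e', 'd', '2', '.'] = false := by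
      simpa using hnd "patch_embed2.".toList (by decide)
    have c5 : PySem.Chars.startswith n ['b', 'l', 'o', 'c', 'k', '2', '.'] = false := by
      simpa using hnd "block2.".toList (by decide)
    have c6 : PySem.Chars.startswith n ['n', 'o', 'r', 'm', '2', '.'] = false := by
      simpa using hnd "norm2.".toList (by decide)
    have c7 : PySem.Chars.startswith n ['p', 'a', 't', 'c', 'h', '_', 'e', 'm', 'b', 'e', 'd', '3', '.'] = false := by
      simpa using hnd "patch_embed3.".toList (by decide)
    have c8 : PySem.Chars.startswith n ['b', 'l', 'o', 'c', 'k', '3', '.'] = false := by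
      simpa using hnd "block3.".toList (by decide)
    have c9 : PySem.Chars.startswith n ['n', 'o', 'r', 'm', '3', '.'] = false := by
      simpa using hnd "norm3.".toList (by decide)
    have c10 : PySem.Chars.startswith n ['p', 'a', 't', 'c', 'h', '_', 'e', 'm', 'b', 'e', 'd', '4', '.'] = false := by
      simpa using hnd "patch_embed4.".toList (by decide)
    have c11 : PySem.Chars.startswith n ['b', 'l', 'o', 'c', 'k', '4', '.'] = false := by
      simpa using hnd "block4.".toList (by decide)
    have c12 : PySem.Chars.startswith n ['n', 'o', 'r', 'm', '4', '.'] = false := by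
      simpa using hnd "norm4.".toList (by decide)
    simp only [pvStageLoopA]
    simp [pvParseB, htw2, c1, c2, c3, c4, c5, c6, c7, c8, c9, c10, c11, c12,
          show PySem.Int.toChars 1 = ['1'] from by decide,
          show PySem.Int.toChars 2 = ['2'] from by decide,
          show PySem.Int.toChars 3 = ['3'] from by decide,
          show PySem.Int.toChars 4 = ['4'] from by decide]

-- ===== VERDICT (by name: the statement is the Claim_ definition above) =====
theorem remap_official_key_py_spec : Claim_equal_remap_official_key_py := by
  intro key _
  unfold Spec_remap_official_key_py remap_official_key_py remap_official_key_py_alt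
  rw [show PySem.List.pyRange 0 4 1 = [0, 1, 2, 3] from by decide]
  simp only [List.foldl, PySem.Chars.slice_eq_listSlice, PySem.List.slice_from_natCast,
             show "module.".toList.length = 7 from rfl, show "model.".toList.length = 6 from rfl]
  split_ifs with h1 <;> try rfl
  all_goals rw [core_eq]; rfl
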